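-- pv_equiv track=rewrite | github.com/ShHaWkK/template-securite-python | src/tp2/analysis/Analysis.py | get_shellcode_strings
-- ===== SOURCE A (Python) =====
-- def get_shellcode_strings(shellcode, min_len=4):
--     """Extrait les chaines ASCII du shellcode."""
--     results = []
--     current = ""
--
--     for byte in shellcode:
--         if 32 <= byte <= 126:
--             current += chr(byte)
--         else:
--             if len(current) >= min_len:
--                 results.append(current)
--             current = ""
--
--     if len(current) >= min_len:
--         results.append(current)
--
--     # enlever doublons
--     seen = set()
--     final = []
--     for s in results:
--         s = s.strip()
--         if s and s not in seen:
--             final.append(s)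
--             seen.add(s)
--
--     return final
-- ===== SOURCE B (Python) =====
-- def get_shellcode_strings(shellcode, min_len=4):
--     """Single fused two-pointer scan: locate each maximal printable run by index
--     and strip/dedup it immediately (no results list, no trailing flush)."""
--     n = len(shellcode)
--     final = []
--     seen = set()
--     i = 0
--     while i < n:
--         if not (32 <= shellcode[i] <= 126):
--             i += 1
--             continue
--         j = i
--         while j < n and 32 <= shellcode[j] <= 126:
--             j += 1
--         if j - i >= min_len:
--             s = ''.join(chr(b) for b in shellcode[i:j]).strip()
--             if s and s not in seen:
--                 final.append(s)
--                 seen.add(s)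
--         i = j
--     return final
-- ===== Notes on version B (the rewrite author's own statement) =====
-- stated objective: alternative
-- what changed: Replaces A's two-stage pipeline (per-byte state-machine accumulator with a trailing flush, then a separate strip/dedup pass over the collected results list) by a single fused two-pointer scan that locates each maximal printable run by index and strips/dedups it immediately, with no intermediate results list and no flush branch.
import Mathlib
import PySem

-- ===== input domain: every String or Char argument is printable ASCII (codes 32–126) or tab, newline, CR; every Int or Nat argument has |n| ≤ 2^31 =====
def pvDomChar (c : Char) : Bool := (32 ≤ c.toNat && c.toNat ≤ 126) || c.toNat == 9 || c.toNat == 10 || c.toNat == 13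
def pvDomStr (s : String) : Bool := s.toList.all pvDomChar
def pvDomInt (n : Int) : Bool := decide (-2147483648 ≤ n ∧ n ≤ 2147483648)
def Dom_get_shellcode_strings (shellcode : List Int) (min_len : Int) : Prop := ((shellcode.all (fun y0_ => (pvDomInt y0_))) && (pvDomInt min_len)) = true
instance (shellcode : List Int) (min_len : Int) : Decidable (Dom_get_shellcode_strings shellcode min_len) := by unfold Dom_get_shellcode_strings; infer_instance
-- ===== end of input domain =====

-- B replaces A's two-stage pipeline (per-byte accumulator + trailing flush, then a strip/dedup
-- pass over the collected results) by one fused two-pointer scan that locates each maximal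
-- printable run by index and strips/dedups it immediately (objective: alternative decomposition).

-- shared character predicates (used by both Pythons verbatim)
def pvPrintable (b : Int) : Bool := decide (32 ≤ b) && decide (b ≤ 126)
def pvChr (b : Int) : Char := Char.ofNat b.toNat

-- ===== PORT A =====
-- 32 <= byte <= 126: current += chr(byte); else flush current if long enough
def pvStepA (min_len : Int) (st : List String × List Char) (byte : Int) : List String × List Char :=
  if pvPrintable byte then (st.1, st.2 ++ [pvChr byte])
  else if (st.2.length : Int) ≥ min_len then (st.1 ++ [String.ofList st.2], [])
  else (st.1, [])

-- s = s.strip(); if s and s not in seen: final.append(s); seen.add(s)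
def pvDedupStep (st : List String × PySem.Set String) (s0 : String) : List String × PySem.Set String :=
  let s := PySem.Str.strip s0
  if (s != "") && !(PySem.Set.contains st.2 s) then (st.1 ++ [s], PySem.Set.add st.2 s) else st

def get_shellcode_strings (shellcode : List Int) (min_len : Int) : List String :=
  let st := shellcode.foldl (pvStepA min_len) ([], [])
  let results := if ((st.2.length : Int) ≥ min_len) then st.1 ++ [String.ofList st.2] else st.1
  (results.foldl pvDedupStep ([], PySem.Set.empty)).1

-- ===== PORT B =====
-- inner loop: j = i; while j < n and 32 <= shellcode[j] <= 126: j += 1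
def pvScan (sc : List Int) (j : Nat) : Nat :=
  if h : j < sc.length ∧ pvPrintable (sc.getD j 0) then pvScan sc (j + 1) else j
termination_by sc.length - j
decreasing_by omega

theorem pvScan_ge_aux (sc : List Int) : ∀ (n j : Nat), sc.length - j ≤ n → j ≤ pvScan sc j := by
  intro n
  induction n with
  | zero =>
    intro j hj
    rw [pvScan]
    split
    · omega
    · exact le_rfl
  | succ n ih =>
    intro j hj
    rw [pvScan]
    split
    · exact Nat.le_of_succ_le (ih (j + 1) (by omega))
    · exact le_rfl

theorem pvScan_ge (sc : List Int) (j : Nat) : j ≤ pvScan sc j :=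
  pvScan_ge_aux sc (sc.length - j) j le_rfl

theorem pvScan_lt (sc : List Int) (i : Nat) (hi : i < sc.length)
    (hp : pvPrintable (sc.getD i 0)) : i < pvScan sc i := by
  rw [pvScan, dif_pos ⟨hi, hp⟩]
  exact Nat.lt_of_lt_of_le (Nat.lt_succ_self i) (pvScan_ge sc (i + 1))

-- outer loop: two-pointer scan over indices, fused strip/dedup
def pvAltGo (sc : List Int) (m : Int) (i : Nat) (seen : PySem.Set String) (final : List String) :
    List String :=
  if hi : i < sc.length then
    if hp : pvPrintable (sc.getD i 0) then
      let j := pvScan sc i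
      if ((j : Int) - (i : Int) ≥ m) then
        let s := PySem.Str.strip (String.ofList
          ((PySem.List.slice sc (some (i : Int)) (some (j : Int))).map pvChr))
        if (s != "") && !(PySem.Set.contains seen s) then
          pvAltGo sc m j (PySem.Set.add seen s) (final ++ [s])
        else pvAltGo sc m j seen final
      else pvAltGo sc m j seen final
    else pvAltGo sc m (i + 1) seen final
  else final
termination_by sc.length - i
decreasing_by
  all_goals first
    | (have := pvScan_lt sc i hi hp; omega)
    | omega

def get_shellcode_strings_alt (shellcode : List Int) (min_len : Int) : List String :=
  pvAltGo shellcode min_len 0 PySem.Set.empty []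

-- ===== PRECONDITION & SPEC =====
def Spec_get_shellcode_strings (shellcode : List Int) (min_len : Int) (out : List String) : Prop := out = get_shellcode_strings_alt shellcode min_len
instance (shellcode : List Int) (min_len : Int) (out : List String) : Decidable (Spec_get_shellcode_strings shellcode min_len out) := by unfold Spec_get_shellcode_strings; infer_instance

-- ===== CLAIM (what is proved, stated in full; the proofs are below) =====
def Claim_equal_get_shellcode_strings : Prop := ∀ (shellcode : List Int) (min_len : Int), Dom_get_shellcode_strings shellcode min_len → Spec_get_shellcode_strings shellcode min_len (get_shellcode_strings shellcode min_len)

-- ===== LEMMAS AND PROOFS =====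

-- the leading printable run of a suffix, and the remainder
def pvSpan : List Int → List Int × List Int
  | [] => ([], [])
  | b :: bs => if pvPrintable b then ((b :: (pvSpan bs).1), (pvSpan bs).2) else ([], b :: bs)

theorem pvSpan_snd_length_le (l : List Int) : (pvSpan l).2.length ≤ l.length := by
  induction l with
  | nil => simp [pvSpan]
  | cons b bs ih => by_cases h : pvPrintable b <;> simp [pvSpan, h] <;> omega

-- proof-side restatement of B's loop on the suffix sc.drop i
def pvGoSuffix (min_len : Int) (l : List Int) (seen : PySem.Set String) (final : List String) :
    List String :=
  match l with
  | [] => final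
  | b :: bs =>
    if h : pvPrintable b then
      let p := pvSpan (b :: bs)
      if ((p.1.length : Int) ≥ min_len) then
        let s := PySem.Str.strip (String.ofList (p.1.map pvChr))
        if (s != "") && !(PySem.Set.contains seen s) then
          pvGoSuffix min_len p.2 (PySem.Set.add seen s) (final ++ [s])
        else pvGoSuffix min_len p.2 seen final
      else pvGoSuffix min_len p.2 seen final
    else pvGoSuffix min_len bs seen final
termination_by l.length
decreasing_by
  all_goals first
    | (simp only [pvSpan, h, if_true]
       have := pvSpan_snd_length_le bs; simp only [List.length_cons]; omega)
    | (simp only [List.length_cons]; omega)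

-- the list of flushed runs A's first stage appends, given pending accumulator c
def pvEmit (m : Int) (c : List Char) : List String :=
  if (c.length : Int) ≥ m then [String.ofList c] else []

def pvRuns (m : Int) (c : List Char) : List Int → List String
  | [] => pvEmit m c
  | b :: bs => if pvPrintable b then pvRuns m (c ++ [pvChr b]) bs
               else pvEmit m c ++ pvRuns m [] bs

-- A's first stage (fold + trailing flush) produces exactly pvRuns
theorem pvStage1_eq (m : Int) (l : List Int) : ∀ (res : List String) (c : List Char),
    (if ((l.foldl (pvStepA m) (res, c)).2.length : Int) ≥ m
      then (l.foldl (pvStepA m) (res, c)).1 ++ [String.ofList (l.foldl (pvStepA m) (res, c)).2]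
      else (l.foldl (pvStepA m) (res, c)).1)
    = res ++ pvRuns m c l := by
  induction l with
  | nil =>
    intro res c
    simp only [List.foldl_nil, pvRuns, pvEmit]
    split <;> simp
  | cons b bs ih =>
    intro res c
    by_cases h : pvPrintable b
    · simp only [List.foldl_cons, pvStepA, h, if_true, pvRuns, ih]
    · by_cases h2 : (c.length : Int) ≥ m
      · simp only [List.foldl_cons, pvStepA, h, if_false, h2, if_true, pvRuns, pvEmit,
          Bool.false_eq_true, ih]
        simp
      · simp only [List.foldl_cons, pvStepA, h, h2, pvRuns, pvEmit,
          Bool.false_eq_true, if_false, ih]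
        simp

-- pvRuns in terms of the leading run (pvSpan) and the remainder past the separator
theorem pvRuns_span (m : Int) (l : List Int) : ∀ (c : List Char),
    pvRuns m c l = pvEmit m (c ++ (pvSpan l).1.map pvChr)
      ++ (match (pvSpan l).2 with | [] => [] | _ :: r => pvRuns m [] r) := by
  induction l with
  | nil => intro c; simp [pvRuns, pvSpan]
  | cons b bs ih =>
    intro c
    by_cases h : pvPrintable b
    · simp only [pvRuns, h, if_true, pvSpan, ih, List.map_cons, List.append_assoc,
        List.cons_append, List.nil_append]
    · simp [pvRuns, h, pvSpan]

theorem pvSpan_snd_head_not_printable (l : List Int) :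
    ∀ x r, (pvSpan l).2 = x :: r → pvPrintable x = false := by
  induction l with
  | nil => intro x r hx; simp [pvSpan] at hx
  | cons b bs ih =>
    intro x r hx
    by_cases h : pvPrintable b
    · simp only [pvSpan, h, if_true] at hx; exact ih x r hx
    · simp only [pvSpan, h, Bool.false_eq_true, if_false] at hx
      injection hx with h1 h2
      rw [← h1]; simpa using h

theorem pvDedupStep_empty (st : List String × PySem.Set String) : pvDedupStep st "" = st := by
  simp [pvDedupStep, show PySem.Str.strip "" = "" from rfl]

theorem pvFoldl_emit (m : Int) (c : List Char) (st : List String × PySem.Set String)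
    (hc : ¬ ((c.length : Int) ≥ m) ∨ c = []) :
    (pvEmit m c).foldl pvDedupStep st = st := by
  rcases hc with h | h
  · simp [pvEmit, h]
  · subst h; simp only [pvEmit]
    split
    · exact pvDedupStep_empty st
    · rfl

-- the suffix loop equals A's dedup fold over pvRuns
theorem pvGoSuffix_eq (m : Int) : ∀ (n : Nat) (l : List Int), l.length ≤ n →
    ∀ (seen : PySem.Set String) (final : List String),
    pvGoSuffix m l seen final = ((pvRuns m [] l).foldl pvDedupStep (final, seen)).1 := by
  intro n
  induction n with
  | zero =>
    intro l hl seen final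
    have : l = [] := List.eq_nil_of_length_eq_zero (Nat.le_zero.mp hl)
    subst this
    simp only [pvGoSuffix, pvRuns]
    rw [pvFoldl_emit m [] _ (Or.inr rfl)]
  | succ n ih =>
    intro l hl seen final
    match l with
    | [] =>
      simp only [pvGoSuffix, pvRuns]
      rw [pvFoldl_emit m [] _ (Or.inr rfl)]
    | b :: bs =>
      by_cases h : pvPrintable b
      · rw [pvGoSuffix]
        simp only [h, dite_true]
        rw [pvRuns_span m (b :: bs) [], List.foldl_append, List.nil_append]
        have hlen : ((pvSpan (b :: bs)).1.map pvChr).length = (pvSpan (b :: bs)).1.length := by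
          simp
        have htail : ∀ (st : List String × PySem.Set String),
            pvGoSuffix m (pvSpan (b :: bs)).2 st.2 st.1
            = (((match (pvSpan (b :: bs)).2 with | [] => [] | _ :: r => pvRuns m [] r)).foldl
                pvDedupStep st).1 := by
          intro st
          cases hp : (pvSpan (b :: bs)).2 with
          | nil => rw [pvGoSuffix]; rfl
          | cons x r =>
            have hx := pvSpan_snd_head_not_printable (b :: bs) x r hp
            rw [pvGoSuffix]
            simp only [hx, Bool.false_eq_true, dite_false]
            refine ih r ?_ st.2 st.1
            have h1 := pvSpan_snd_length_le bs
            have h2 : (pvSpan (b :: bs)).2 = (pvSpan bs).2 := by simp [pvSpan, h]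
            rw [h2] at hp
            have := congrArg List.length hp
            simp at this hl; omega
        by_cases h2 : (((pvSpan (b :: bs)).1.length : Int) ≥ m)
        · simp only [h2, if_true]
          have hemit : pvEmit m ((pvSpan (b :: bs)).1.map pvChr)
              = [String.ofList ((pvSpan (b :: bs)).1.map pvChr)] := by
            simp [pvEmit, hlen, h2]
          rw [hemit]
          simp only [List.foldl_cons, List.foldl_nil]
          rw [show (pvDedupStep (final, seen) (String.ofList ((pvSpan (b :: bs)).1.map pvChr)))
              = (let s := PySem.Str.strip (String.ofList ((pvSpan (b :: bs)).1.map pvChr));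
                 if (s != "") && !(PySem.Set.contains seen s) then (final ++ [s], PySem.Set.add seen s)
                 else (final, seen)) from rfl]
          by_cases h3 : ((PySem.Str.strip (String.ofList ((pvSpan (b :: bs)).1.map pvChr)) != "")
              && !(PySem.Set.contains seen (PySem.Str.strip (String.ofList ((pvSpan (b :: bs)).1.map pvChr)))))
          · simp only [h3, if_true]
            exact htail (final ++ [PySem.Str.strip (String.ofList ((pvSpan (b :: bs)).1.map pvChr))],
              PySem.Set.add seen (PySem.Str.strip (String.ofList ((pvSpan (b :: bs)).1.map pvChr))))
          · simp only [h3, Bool.false_eq_true, if_false]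
            exact htail (final, seen)
        · simp only [h2, if_false]
          rw [pvFoldl_emit m _ _ (Or.inl (by rw [hlen]; exact h2))]
          exact htail (final, seen)
      · rw [pvGoSuffix]
        simp only [h, Bool.false_eq_true, dite_false]
        rw [show pvRuns m [] (b :: bs) = pvEmit m [] ++ pvRuns m [] bs by
          simp [pvRuns, h]]
        rw [List.foldl_append, pvFoldl_emit m [] _ (Or.inr rfl)]
        refine ih bs ?_ seen final
        simp at hl; omega

-- pvScan computes the end of the leading printable run of the suffix
theorem pvScan_eq (sc : List Int) : ∀ (n j : Nat), sc.length - j ≤ n →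
    pvScan sc j = j + (pvSpan (sc.drop j)).1.length := by
  intro n
  induction n with
  | zero =>
    intro j hj
    have hd : sc.drop j = [] := List.drop_eq_nil_of_le (by omega)
    rw [pvScan]
    split
    · omega
    · simp [hd, pvSpan]
  | succ n ih =>
    intro j hj
    rw [pvScan]
    split
    · rename_i h
      obtain ⟨hjl, hp⟩ := h
      have hd : sc.drop j = sc[j] :: sc.drop (j + 1) := List.drop_eq_getElem_cons hjl
      have hg : sc.getD j 0 = sc[j] := List.getD_eq_getElem sc 0 hjl
      rw [ih (j + 1) (by omega), hd]
      rw [hg] at hp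
      simp [pvSpan, hp]; omega
    · rename_i h
      by_cases hjl : j < sc.length
      · have hp : ¬ pvPrintable (sc.getD j 0) := by tauto
        have hd : sc.drop j = sc[j] :: sc.drop (j + 1) := List.drop_eq_getElem_cons hjl
        have hg : sc.getD j 0 = sc[j] := List.getD_eq_getElem sc 0 hjl
        rw [hg] at hp
        rw [hd]
        simp [pvSpan, hp]
      · have hd : sc.drop j = [] := List.drop_eq_nil_of_le (by omega)
        simp [hd, pvSpan]

theorem pvSpan_take (l : List Int) : l.take (pvSpan l).1.length = (pvSpan l).1 := by
  induction l with
  | nil => simp [pvSpan]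
  | cons b bs ih =>
    by_cases h : pvPrintable b <;> simp [pvSpan, h, ih]

theorem pvSpan_drop (l : List Int) : l.drop (pvSpan l).1.length = (pvSpan l).2 := by
  induction l with
  | nil => simp [pvSpan]
  | cons b bs ih =>
    by_cases h : pvPrintable b <;> simp [pvSpan, h, ih]

-- B's index loop equals the suffix loop on sc.drop i
theorem pvAltGo_eq_suffix (sc : List Int) (m : Int) : ∀ (n i : Nat), sc.length - i ≤ n →
    ∀ (seen : PySem.Set String) (final : List String),
    pvAltGo sc m i seen final = pvGoSuffix m (sc.drop i) seen final := by
  intro n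
  induction n with
  | zero =>
    intro i hi seen final
    have hd : sc.drop i = [] := List.drop_eq_nil_of_le (by omega)
    rw [pvAltGo, dif_neg (by omega), hd, pvGoSuffix]
  | succ n ih =>
    intro i hi seen final
    by_cases hil : i < sc.length
    · have hd : sc.drop i = sc[i] :: sc.drop (i + 1) := List.drop_eq_getElem_cons hil
      have hg : sc.getD i 0 = sc[i] := List.getD_eq_getElem sc 0 hil
      by_cases hp : pvPrintable (sc.getD i 0)
      · have hscan := pvScan_eq sc (sc.length - i) i le_rfl
        have hrunlen : (pvSpan (sc.drop i)).1.length = pvScan sc i - i := by omega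
        have hlt : i < pvScan sc i := pvScan_lt sc i hil hp
        have hslice : PySem.List.slice sc (some (i : Int)) (some ((pvScan sc i : Nat) : Int))
            = (pvSpan (sc.drop i)).1 := by
          rw [PySem.List.slice_natCast, ← hrunlen, pvSpan_take]
        have hdrop : sc.drop (pvScan sc i) = (pvSpan (sc.drop i)).2 := by
          rw [← pvSpan_drop (sc.drop i), List.drop_drop, hrunlen]
          congr 1; omega
        have hcond : (((pvScan sc i : Nat) : Int) - (i : Int) ≥ m)
            ↔ (((pvSpan (sc.drop i)).1.length : Int) ≥ m) := by
          rw [hrunlen]; constructor <;> intro <;> omega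
        have hps : pvSpan (sc.drop i) = (sc[i] :: (pvSpan (sc.drop (i + 1))).1,
            (pvSpan (sc.drop (i + 1))).2) := by
          rw [hd]; rw [hg] at hp; simp [pvSpan, hp]
        rw [pvAltGo, dif_pos hil, dif_pos hp]
        rw [hd, pvGoSuffix]
        have hp' : pvPrintable sc[i] := by rw [← hg]; exact hp
        simp only [hp', dite_true, ← hd]
        have hrest : sc.length - pvScan sc i ≤ n := by omega
        by_cases hc : (((pvScan sc i : Nat) : Int) - (i : Int) ≥ m)
        · rw [if_pos hc, if_pos (hcond.mp hc), hslice]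
          by_cases h3 : ((PySem.Str.strip (String.ofList ((pvSpan (sc.drop i)).1.map pvChr)) != "")
              && !(PySem.Set.contains seen (PySem.Str.strip (String.ofList ((pvSpan (sc.drop i)).1.map pvChr)))))
          · rw [if_pos h3, if_pos h3, ih (pvScan sc i) hrest, hdrop]
          · rw [if_neg h3, if_neg h3, ih (pvScan sc i) hrest, hdrop]
        · rw [if_neg hc, if_neg (fun hh => hc (hcond.mpr hh)), ih (pvScan sc i) hrest, hdrop]
      · rw [pvAltGo, dif_pos hil, dif_neg hp]
        rw [hd, pvGoSuffix]
        have hp' : ¬ pvPrintable sc[i] := by rw [← hg]; exact hp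
        simp only [hp']
        exact ih (i + 1) (by omega) seen final
    · have hd : sc.drop i = [] := List.drop_eq_nil_of_le (by omega)
      rw [pvAltGo, dif_neg hil, hd, pvGoSuffix]

-- ===== VERDICT (by name: the statement is the Claim_ definition above) =====
theorem get_shellcode_strings_spec : Claim_equal_get_shellcode_strings := by
  intro shellcode min_len _
  show get_shellcode_strings shellcode min_len = get_shellcode_strings_alt shellcode min_len
  rw [get_shellcode_strings_alt,
    pvAltGo_eq_suffix shellcode min_len shellcode.length 0 (by omega) PySem.Set.empty [],
    List.drop_zero,
    pvGoSuffix_eq min_len shellcode.length shellcode le_rfl PySem.Set.empty []]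
  simp only [get_shellcode_strings]
  rw [show (if ((shellcode.foldl (pvStepA min_len) ([], [])).2.length : Int) ≥ min_len
      then (shellcode.foldl (pvStepA min_len) ([], [])).1
        ++ [String.ofList (shellcode.foldl (pvStepA min_len) ([], [])).2]
      else (shellcode.foldl (pvStepA min_len) ([], [])).1)
    = [] ++ pvRuns min_len [] shellcode from pvStage1_eq min_len shellcode [] []]
  rw [List.nil_append]
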